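-- pv_equiv track=rewrite | github.com/fadai216/binance-alpha-finance-skill | backend/finance_monitor/service.py | _is_finance_activity
-- ===== SOURCE A (Python) =====
-- def _is_finance_activity(title: str, conditions: str, reward: str) -> bool:
--     blob = " ".join([title, conditions, reward]).lower()
--     keywords = (
--         "binance earn",
--         "simple earn",
--         "flexible product",
--         "flexible products",
--         "locked product",
--         "locked products",
--         "apr",
--         "staking",
--         "subscribe to",
--     )
--     return any(keyword in blob for keyword in keywords)
-- ===== SOURCE B (Python) =====
-- # Finance keywords; plural product forms are listed explicitly alongside singular ones.
-- KEYWORDS = ("binance earn", "simple earn", "flexible product", "flexible products",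
--             "locked product", "locked products", "apr", "staking", "subscribe to")
--
--
-- def _is_finance_activity(title: str, conditions: str, reward: str) -> bool:
--     # Streaming multi-pattern matcher: walk the text once, keeping the list of
--     # keyword suffixes still pending after a partial match; a keyword is found
--     # the moment its last pending character is consumed.
--     text = " ".join([title, conditions, reward]).lower()
--     pending = []  # suffixes of keywords whose prefix matched up to here
--     for ch in text:
--         nxt = []
--         for rest in pending + list(KEYWORDS):
--             if rest[0] == ch:
--                 if len(rest) == 1:
--                     return True
--                 nxt.append(rest[1:])
--         pending = nxt
--     return False
-- ===== Notes on version B (the rewrite author's own statement) =====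
-- stated objective: alternative
-- what changed: Replaces nine independent 'keyword in blob' substring scans with a single forward streaming pass that maintains the set of active partial-match keyword suffixes (NFA-style multi-pattern matching), returning as soon as any keyword completes.
import Mathlib
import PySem

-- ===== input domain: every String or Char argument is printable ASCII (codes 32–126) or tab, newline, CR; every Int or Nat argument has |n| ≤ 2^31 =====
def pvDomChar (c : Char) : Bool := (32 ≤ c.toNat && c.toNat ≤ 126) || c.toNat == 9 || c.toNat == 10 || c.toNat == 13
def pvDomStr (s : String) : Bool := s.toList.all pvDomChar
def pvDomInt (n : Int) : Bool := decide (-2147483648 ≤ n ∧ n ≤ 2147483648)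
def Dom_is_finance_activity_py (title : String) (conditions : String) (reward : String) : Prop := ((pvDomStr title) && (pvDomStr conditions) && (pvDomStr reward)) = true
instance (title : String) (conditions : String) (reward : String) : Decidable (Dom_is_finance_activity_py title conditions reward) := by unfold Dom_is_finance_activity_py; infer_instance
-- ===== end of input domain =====

-- B replaces nine independent substring scans with one streaming pass maintaining active partial-match keyword suffixes (alternative, same cost).

-- ===== PORT A =====
def pvKeywordsA : List String :=
  ["binance earn", "simple earn", "flexible product", "flexible products",
   "locked product", "locked products", "apr", "staking", "subscribe to"]

def is_finance_activity_py (title : String) (conditions : String) (reward : String) : Bool :=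
  let blob := PySem.Str.lower (PySem.Str.join " " [title, conditions, reward])
  pvKeywordsA.any (fun keyword => PySem.Str.isIn keyword blob)

-- ===== PORT B =====
def pvKeywordsB : List (List Char) :=
  ["binance earn".toList, "simple earn".toList, "flexible product".toList,
   "flexible products".toList, "locked product".toList, "locked products".toList,
   "apr".toList, "staking".toList, "subscribe to".toList]

-- B's inner loop over 'pending + list(KEYWORDS)'. 'none' = the early 'return True'
-- (a keyword's last character was consumed); 'some nxt' = the advanced suffix list.
-- Every entry is a keyword or a nonempty keyword suffix, so the [] case is unreachable
-- (Python's rest[0] never runs on an empty string); it is ported as a skip.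
def pvStep (ch : Char) : List (List Char) → Option (List (List Char))
  | [] => some []
  | [] :: rs => pvStep ch rs
  | (c :: cs) :: rs =>
      if c = ch then
        if cs = [] then none
        else (pvStep ch rs).map (cs :: ·)
      else pvStep ch rs

-- B's outer 'for ch in text' loop with the 'pending' accumulator.
def pvRun : List Char → List (List Char) → Bool
  | [], _ => false
  | ch :: t, pending =>
      match pvStep ch (pending ++ pvKeywordsB) with
      | none => true
      | some nxt => pvRun t nxt

def is_finance_activity_py_alt (title : String) (conditions : String) (reward : String) : Bool :=
  let text := PySem.Str.lower (PySem.Str.join " " [title, conditions, reward])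
  pvRun text.toList []

-- ===== PRECONDITION & SPEC =====
def Spec_is_finance_activity_py (title : String) (conditions : String) (reward : String) (out : Bool) : Prop := out = is_finance_activity_py_alt title conditions reward
instance (title : String) (conditions : String) (reward : String) (out : Bool) : Decidable (Spec_is_finance_activity_py title conditions reward out) := by unfold Spec_is_finance_activity_py; infer_instance

-- ===== CLAIM =====
def Claim_equal_is_finance_activity_py : Prop := ∀ (title : String) (conditions : String) (reward : String), Dom_is_finance_activity_py title conditions reward → Spec_is_finance_activity_py title conditions reward (is_finance_activity_py title conditions reward)

-- ===== LEMMAS AND PROOFS =====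

-- the advanced-suffix list: drop the matched head of each candidate starting with ch
def pvAdv (ch : Char) (L : List (List Char)) : List (List Char) :=
  L.filterMap (fun rest => match rest with
    | [] => none
    | c :: cs => if c = ch then some cs else none)

theorem pvStep_eq_none_iff (ch : Char) (L : List (List Char)) :
    pvStep ch L = none ↔ [ch] ∈ L := by
  induction L with
  | nil => simp [pvStep]
  | cons r rs ih =>
      match r with
      | [] => simpa [pvStep] using ih
      | c :: cs =>
          by_cases hc : c = ch
          · by_cases hcs : cs = []
            · subst hc; subst hcs; simp [pvStep]
            · simp only [pvStep, if_pos hc, if_neg hcs]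
              cases h : pvStep ch rs with
              | none => simp [hc, hcs, ← ih, h]
              | some nxt => simp [hcs, ← ih, h]
          · simp only [pvStep, if_neg hc, ih, List.mem_cons]
            constructor
            · exact Or.inr
            · rintro (h | h)
              · cases h; exact absurd rfl hc
              · exact h

theorem pvStep_eq_some (ch : Char) (L L' : List (List Char))
    (h : pvStep ch L = some L') : L' = pvAdv ch L := by
  induction L generalizing L' with
  | nil => simp [pvStep] at h; subst h; simp [pvAdv]
  | cons r rs ih =>
      match r with
      | [] =>
          simp only [pvStep] at h
          simpa [pvAdv] using ih _ h
      | c :: cs =>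
          by_cases hc : c = ch
          · by_cases hcs : cs = []
            · simp [pvStep, hc, hcs] at h
            · simp only [pvStep, if_pos hc, if_neg hcs] at h
              cases hs : pvStep ch rs with
              | none => rw [hs] at h; simp at h
              | some nxt =>
                  rw [hs] at h
                  simp only [Option.map_some, Option.some.injEq] at h
                  simp [pvAdv, hc, ← h, ih _ hs, pvAdv]
          · simp only [pvStep, if_neg hc] at h
            simp [pvAdv, hc, ih _ h, pvAdv]

theorem mem_pvAdv (ch : Char) (L : List (List Char)) (r : List Char) :
    r ∈ pvAdv ch L ↔ (ch :: r) ∈ L := by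
  simp only [pvAdv, List.mem_filterMap]
  constructor
  · rintro ⟨a, ha, hf⟩
    match a with
    | [] => simp at hf
    | c :: cs =>
        by_cases hc : c = ch
        · simp [hc] at hf; subst hc; subst hf; exact ha
        · simp [hc] at hf
  · intro h
    exact ⟨ch :: r, h, by simp⟩

theorem pvKeywordsB_ne_nil : ∀ kw ∈ pvKeywordsB, kw ≠ [] := by decide

theorem pvRun_iff (s : List Char) : ∀ (pending : List (List Char)),
    pvRun s pending = true ↔
      (∃ r ∈ pending, r ≠ [] ∧ r <+: s) ∨ (∃ kw ∈ pvKeywordsB, kw <:+: s) := by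
  induction s with
  | nil =>
      intro pending
      simp only [pvRun]
      constructor
      · intro h; exact absurd h (by simp)
      · rintro (⟨r, _, hne, hpre⟩ | ⟨kw, hmem, hinf⟩)
        · exact absurd (List.prefix_nil.mp hpre) hne
        · exact absurd (List.infix_nil.mp hinf) (pvKeywordsB_ne_nil kw hmem)
  | cons ch t ih =>
      intro pending
      simp only [pvRun]
      cases hstep : pvStep ch (pending ++ pvKeywordsB) with
      | none =>
          have hm := (pvStep_eq_none_iff ch _).mp hstep
          simp only [List.mem_append] at hm
          constructor
          · intro _
            rcases hm with hm | hm
            · exact Or.inl ⟨[ch], hm, by simp, by simp⟩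
            · exact Or.inr ⟨[ch], hm, ((List.cons_prefix_cons.mpr ⟨rfl, List.nil_prefix⟩ : [ch] <+: ch :: t)).isInfix⟩
          · intro _; rfl
      | some nxt =>
          have hnotone : [ch] ∉ pending ++ pvKeywordsB := by
            intro hmem
            simp [(pvStep_eq_none_iff ch _).mpr hmem] at hstep
          have hnxt : nxt = pvAdv ch (pending ++ pvKeywordsB) := pvStep_eq_some ch _ _ hstep
          rw [ih nxt]
          constructor
          · rintro (⟨r, hr, hne, hpre⟩ | ⟨kw, hmem, hinf⟩)
            · rw [hnxt, mem_pvAdv, List.mem_append] at hr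
              rcases hr with hr | hr
              · exact Or.inl ⟨ch :: r, hr, by simp, List.cons_prefix_cons.mpr ⟨rfl, hpre⟩⟩
              · exact Or.inr ⟨ch :: r, hr,
                  (List.cons_prefix_cons.mpr ⟨rfl, hpre⟩ : ch :: r <+: ch :: t).isInfix⟩
            · exact Or.inr ⟨kw, hmem, List.infix_cons_iff.mpr (Or.inr hinf)⟩
          · rintro (⟨r, hr, hne, hpre⟩ | ⟨kw, hmem, hinf⟩)
            · match r, hne with
              | c :: cs, _ =>
                have hc : c = ch := (List.cons_prefix_cons.mp hpre).1
                subst hc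
                have hcs : cs ≠ [] := by
                  intro h; subst h; exact hnotone (List.mem_append.mpr (Or.inl hr))
                exact Or.inl ⟨cs, by
                  rw [hnxt, mem_pvAdv]; exact List.mem_append.mpr (Or.inl hr),
                  hcs, (List.cons_prefix_cons.mp hpre).2⟩
            · rcases List.infix_cons_iff.mp hinf with hpre | hinf'
              · match kw, pvKeywordsB_ne_nil kw hmem with
                | c :: cs, _ =>
                  have hc : c = ch := (List.cons_prefix_cons.mp hpre).1
                  subst hc
                  have hcs : cs ≠ [] := by
                    intro h; subst h; exact hnotone (List.mem_append.mpr (Or.inr hmem))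
                  exact Or.inl ⟨cs, by
                    rw [hnxt, mem_pvAdv]; exact List.mem_append.mpr (Or.inr hmem),
                    hcs, (List.cons_prefix_cons.mp hpre).2⟩
              · exact Or.inr ⟨kw, hmem, hinf'⟩

theorem pvKeywordsB_eq : pvKeywordsB = pvKeywordsA.map String.toList := by decide

-- ===== VERDICT =====
theorem is_finance_activity_py_spec : Claim_equal_is_finance_activity_py := by
  intro title conditions reward _
  show _ = _
  unfold is_finance_activity_py is_finance_activity_py_alt
  rw [Bool.eq_iff_iff, pvRun_iff _ [], pvKeywordsB_eq]
  simp only [List.any_eq_true, List.not_mem_nil, false_and, exists_false,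
    false_or, List.mem_map]
  constructor
  · rintro ⟨kw, hmem, h⟩
    exact ⟨kw.toList, ⟨kw, hmem, rfl⟩, (PySem.Str.isIn_iff_infix kw _).mp h⟩
  · rintro ⟨_, ⟨kw, hmem, rfl⟩, h⟩
    exact ⟨kw, hmem, (PySem.Str.isIn_iff_infix kw _).mpr h⟩
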